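-- pv_equiv track=rewrite | github.com/comp110-24f/comp-110-workspace-cduneva | basketball game/shlok.py | calculate_team_chemistry
-- ===== SOURCE A (Python) =====
-- def calculate_team_chemistry(team):
--     chemistry = 0
--     for position in team.values():
--         for player in position:
--             # Players with ratings above 90 boost team chemistry
--             if player["rating"] > 90:
--                 chemistry += 5
--             # Players with ratings between 85-90 slightly boost chemistry
--             elif 85 <= player["rating"] <= 90:
--                 chemistry += 3
--     return chemistry
-- ===== SOURCE B (Python) =====
-- def calculate_team_chemistry(team):
--     players = [p for position in team.values() for p in position]
--     high = sum(1 for p in players if p["rating"] > 90)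
--     mid = sum(1 for p in players if 85 <= p["rating"] <= 90)
--     return 5 * high + 3 * mid
-- ===== Notes on version B (the rewrite author's own statement) =====
-- stated objective: simpler
-- what changed: Replaces the single accumulating if/elif nested loop with a flatten plus two independent band counts combined by the closed form 5*high + 3*mid.
import Mathlib
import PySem

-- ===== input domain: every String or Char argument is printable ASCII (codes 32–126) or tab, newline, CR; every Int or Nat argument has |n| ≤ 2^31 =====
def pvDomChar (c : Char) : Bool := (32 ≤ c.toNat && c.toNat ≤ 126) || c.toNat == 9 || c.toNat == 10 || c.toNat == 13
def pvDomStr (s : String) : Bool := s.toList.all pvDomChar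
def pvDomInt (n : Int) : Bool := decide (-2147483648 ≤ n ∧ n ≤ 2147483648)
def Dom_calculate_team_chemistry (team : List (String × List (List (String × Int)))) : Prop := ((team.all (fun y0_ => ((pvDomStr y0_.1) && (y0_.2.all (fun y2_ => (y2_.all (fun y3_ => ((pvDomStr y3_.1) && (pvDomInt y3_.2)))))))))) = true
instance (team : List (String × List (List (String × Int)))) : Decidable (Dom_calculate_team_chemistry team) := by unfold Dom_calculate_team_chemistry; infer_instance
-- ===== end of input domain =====

-- B replaces the accumulating if/elif nested loop by a flatten plus two band counts combined as 5*high + 3*mid (simpler decomposition, same cost).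


-- ===== PORT A =====
-- player["rating"]: first-match lookup; total via getD 0, exact under Pre_ (key present)
def pvRatingA (p : List (String × Int)) : Int := (List.lookup "rating" p).getD 0

def calculate_team_chemistry (team : List (String × List (List (String × Int)))) : Int :=
  team.foldl (fun chemistry position =>
    position.2.foldl (fun chemistry player =>
      if 90 < pvRatingA player then chemistry + 5
      else if 85 ≤ pvRatingA player ∧ pvRatingA player ≤ 90 then chemistry + 3
      else chemistry) chemistry) 0

-- ===== PORT B =====
def pvRatingB (p : List (String × Int)) : Int := (List.lookup "rating" p).getD 0

def calculate_team_chemistry_alt (team : List (String × List (List (String × Int)))) : Int :=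
  let players := (team.map Prod.snd).flatten
  let high := players.countP (fun p => decide (90 < pvRatingB p))
  let mid := players.countP (fun p => decide (85 ≤ pvRatingB p ∧ pvRatingB p ≤ 90))
  5 * (high : Int) + 3 * (mid : Int)

-- ===== PRECONDITION & SPEC =====
-- Pre_ excludes exactly the inputs where some player dict lacks the key "rating": Python A raises KeyError there.
def Pre_calculate_team_chemistry (team : List (String × List (List (String × Int)))) : Prop :=
  (team.all (fun position => position.2.all (fun player => player.any (fun kv => kv.1 == "rating")))) = true
instance (team : List (String × List (List (String × Int)))) : Decidable (Pre_calculate_team_chemistry team) := by unfold Pre_calculate_team_chemistry; infer_instance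

def pvWitness_calculate_team_chemistry : (List (String × List (List (String × Int)))) :=
  [("GK", [[("rating", 92)], [("rating", 85)]]), ("DEF", [])]

def Spec_calculate_team_chemistry (team : List (String × List (List (String × Int)))) (out : Int) : Prop := out = calculate_team_chemistry_alt team
instance (team : List (String × List (List (String × Int)))) (out : Int) : Decidable (Spec_calculate_team_chemistry team out) := by unfold Spec_calculate_team_chemistry; infer_instance

-- ===== CLAIM (what is proved, stated in full; the proofs are below) =====
def Claim_equal_calculate_team_chemistry : Prop := ∀ (team : List (String × List (List (String × Int)))), Dom_calculate_team_chemistry team → Pre_calculate_team_chemistry team → Spec_calculate_team_chemistry team (calculate_team_chemistry team)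

-- ===== LEMMAS AND PROOFS =====

-- A's inner loop over one position adds 5 per high-band and 3 per mid-band player to the accumulator.
theorem pv_inner (players : List (List (String × Int))) (acc : Int) :
    players.foldl (fun chemistry player =>
      if 90 < pvRatingA player then chemistry + 5
      else if 85 ≤ pvRatingA player ∧ pvRatingA player ≤ 90 then chemistry + 3
      else chemistry) acc
    = acc + 5 * (players.countP (fun p => decide (90 < pvRatingB p)) : Int)
          + 3 * (players.countP (fun p => decide (85 ≤ pvRatingB p ∧ pvRatingB p ≤ 90)) : Int) := by
  induction players generalizing acc with
  | nil => simp
  | cons p ps ih =>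
    have hr : pvRatingB p = pvRatingA p := rfl
    simp only [List.foldl_cons, List.countP_cons, ih]
    rw [hr]
    by_cases h1 : 90 < pvRatingA p
    · have h2 : ¬ (85 ≤ pvRatingA p ∧ pvRatingA p ≤ 90) := by omega
      simp [h1, h2]
      omega
    · by_cases h2 : 85 ≤ pvRatingA p ∧ pvRatingA p ≤ 90
      · simp [h1, h2]
        omega
      · simp [h1, h2]

-- A's outer loop equals B's counts over the flattened players.
theorem pv_outer (team : List (String × List (List (String × Int)))) (acc : Int) :
    team.foldl (fun chemistry position =>
      position.2.foldl (fun chemistry player =>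
        if 90 < pvRatingA player then chemistry + 5
        else if 85 ≤ pvRatingA player ∧ pvRatingA player ≤ 90 then chemistry + 3
        else chemistry) chemistry) acc
    = acc + 5 * (((team.map Prod.snd).flatten).countP (fun p => decide (90 < pvRatingB p)) : Int)
          + 3 * (((team.map Prod.snd).flatten).countP (fun p => decide (85 ≤ pvRatingB p ∧ pvRatingB p ≤ 90)) : Int) := by
  induction team generalizing acc with
  | nil => simp
  | cons pos rest ih =>
    simp only [List.foldl_cons, ih]
    rw [pv_inner]
    simp only [List.map_cons, List.flatten_cons, List.countP_append]
    push_cast; ring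

-- ===== VERDICT (by name: the statement is the Claim_ definition above) =====
theorem calculate_team_chemistry_spec : Claim_equal_calculate_team_chemistry := by
  intro team _ _
  unfold Spec_calculate_team_chemistry calculate_team_chemistry calculate_team_chemistry_alt
  rw [pv_outer]; ring
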